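-- pv_equiv track=rewrite | github.com/GEECS-BELLA/GEECS-Plugins | GEECS-PythonAPI/geecs_python_api/controls/data_acquisition/data_acquisition.py | preprocess_observables
-- ===== SOURCE A (Python) =====
-- def preprocess_observables(observables):
--     device_map = {}
--     for observable in observables:
--         device_name, var_name = observable.split(':')
--         if device_name not in device_map:
--             device_map[device_name] = []
--         device_map[device_name].append(var_name)
--     return device_map
-- ===== SOURCE B (Python) =====
-- def preprocess_observables(observables):
--     pairs = []
--     for observable in observables:
--         device_name, var_name = observable.split(':')
--         pairs.append((device_name, var_name))
--     return {d: [v for d2, v in pairs if d2 == d]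
--             for d in dict.fromkeys(d for d, _ in pairs)}
-- ===== Notes on version B (the rewrite author's own statement) =====
-- stated objective: alternative
-- what changed: B replaces A's incremental dict-of-lists grouping by a two-phase pass: it first flattens every observable to a (device, var) pair list, then builds the result with one filter-comprehension per distinct device (first-occurrence order via dict.fromkeys).
import Mathlib
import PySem

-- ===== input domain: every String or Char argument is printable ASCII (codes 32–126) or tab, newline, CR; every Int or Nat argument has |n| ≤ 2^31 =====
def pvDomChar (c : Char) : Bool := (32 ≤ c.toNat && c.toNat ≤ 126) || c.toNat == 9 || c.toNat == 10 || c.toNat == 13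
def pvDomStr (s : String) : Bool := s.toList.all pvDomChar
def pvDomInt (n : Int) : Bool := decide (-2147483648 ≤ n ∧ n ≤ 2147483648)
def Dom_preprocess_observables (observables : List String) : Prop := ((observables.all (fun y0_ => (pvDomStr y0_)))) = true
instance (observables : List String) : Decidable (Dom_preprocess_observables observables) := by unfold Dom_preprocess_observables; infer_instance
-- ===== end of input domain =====

-- B regroups via a flat (device, var) pair list and one filter per distinct device
-- (first-occurrence order), instead of A's incremental dict-of-lists; equal output proved.


-- ===== PORT A =====
-- for observable: (d, v) = split(':'); if d not in map: map[d] = []; map[d].append(v)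
-- (the unpack raises ValueError unless the split has exactly 2 parts; those inputs are outside Pre_)
def preprocess_observables (observables : List String) : List (String × List String) :=
  (observables.foldl (fun m obs =>
    match PySem.Str.split? obs ":" with
    | some [d, v] =>
        let m1 := if m.contains d = false then m.insert d ([] : List String) else m
        m1.modify d [] (fun l => l ++ [v])
    | _ => m) (PySem.Dict.empty : PySem.Dict String (List String))).items

-- ===== PORT B =====
-- tuple unpack 'd, v = obs.split(':')': the pair, or none where Python raises ValueError
def pvUnpack2? (l? : Option (List String)) : Option (String × String) :=
  match l? with
  | none => none
  | some [] => none
  | some [_] => none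
  | some [d, v] => some (d, v)
  | some (_ :: _ :: _ :: _) => none

-- flatten to pairs, then one filter-comprehension per distinct device (first-occurrence order)
def preprocess_observables_alt (observables : List String) : List (String × List String) :=
  let pairs : List (String × String) := observables.foldl (fun ps obs =>
    match pvUnpack2? (PySem.Str.split? obs ":") with
    | some dv => ps ++ [dv]
    | none => ps) []
  (PySem.List.dedup (pairs.map Prod.fst)).map
    (fun d => (d, (pairs.filter (fun p => p.1 == d)).map Prod.snd))

-- ===== PRECONDITION & SPEC =====
-- Pre_ excludes exactly the inputs on which Python A raises ValueError: an observable whose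
-- split(':') does not have exactly two parts (i.e. not exactly one ':').
def Pre_preprocess_observables (observables : List String) : Prop :=
  ∀ obs ∈ observables, PySem.Str.count obs ":" = 1
instance (observables : List String) : Decidable (Pre_preprocess_observables observables) := by unfold Pre_preprocess_observables; infer_instance

def pvWitness_preprocess_observables : List String := ["dev1:x", "dev2:y", "dev1:z", ":"]

def Spec_preprocess_observables (observables : List String) (out : List (String × List String)) : Prop := out = preprocess_observables_alt observables
instance (observables : List String) (out : List (String × List String)) : Decidable (Spec_preprocess_observables observables out) := by unfold Spec_preprocess_observables; infer_instance

-- ===== CLAIM (what is proved, stated in full; the proofs are below) =====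
def Claim_equal_preprocess_observables : Prop := ∀ (observables : List String), Dom_preprocess_observables observables → Pre_preprocess_observables observables → Spec_preprocess_observables observables (preprocess_observables observables)

-- ===== LEMMAS AND PROOFS =====

-- the (device, var) pair an observable contributes (none if the unpack would raise)
def pvPair (obs : String) : List (String × String) :=
  match PySem.Str.split? obs ":" with
  | some [d, v] => [(d, v)]
  | _ => []

-- A's loop body, on the pair level
def pvStep (m : PySem.Dict String (List String)) (p : String × String) :
    PySem.Dict String (List String) :=
  let m1 := if m.contains p.1 = false then m.insert p.1 ([] : List String) else m
  m1.modify p.1 [] (fun l => l ++ [p.2])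

-- B's per-device var list and result items, as standalone functions
def pvV (L : List (String × String)) (x : String) : List String :=
  (L.filter (fun p => p.1 == x)).map Prod.snd

def pvItems (L : List (String × String)) : List (String × List String) :=
  (PySem.List.dedup (L.map Prod.fst)).map (fun x => (x, pvV L x))

lemma pvA_fold (observables : List String) (m : PySem.Dict String (List String)) :
    observables.foldl (fun m obs =>
      match PySem.Str.split? obs ":" with
      | some [d, v] =>
          let m1 := if m.contains d = false then m.insert d ([] : List String) else m
          m1.modify d [] (fun l => l ++ [v])
      | _ => m) m = (observables.flatMap pvPair).foldl pvStep m := by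
  induction observables generalizing m with
  | nil => rfl
  | cons obs rest ih =>
      simp only [List.foldl_cons, List.flatMap_cons, List.foldl_append]
      rw [ih]
      congr 1
      unfold pvPair
      rcases h : PySem.Str.split? obs ":" with _ | l
      · rfl
      · rcases l with _ | ⟨d, _ | ⟨v, _ | _⟩⟩ <;> rfl

lemma pvB_pairs (observables : List String) :
    observables.foldl (fun ps obs =>
      match pvUnpack2? (PySem.Str.split? obs ":") with
      | some dv => ps ++ [dv]
      | none => ps) ([] : List (String × String)) = observables.flatMap pvPair := by
  have hf : (fun (ps : List (String × String)) obs =>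
      match pvUnpack2? (PySem.Str.split? obs ":") with
      | some dv => ps ++ [dv]
      | none => ps) = (fun ps obs => ps ++ pvPair obs) := by
    funext ps obs
    unfold pvPair pvUnpack2?
    rcases h : PySem.Str.split? obs ":" with _ | l
    · simp
    · rcases l with _ | ⟨d, _ | ⟨v, _ | _⟩⟩ <;> simp
  rw [hf, PySem.List.foldl_append_eq_flatMap]
  simp

lemma pvContains (L : List (String × String)) (d : String) :
    (PySem.Dict.mk (pvItems L)).contains d = decide (d ∈ L.map Prod.fst) := by
  simp only [PySem.Dict.contains, pvItems, List.any_map, Function.comp_def, List.any_beq']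
  by_cases h : d ∈ L.map Prod.fst <;> simp [h]

-- lookup in a dict whose items are keyed by a function of the key
lemma pvGet_mk_map (K : List String) (V : String → List String) (d : String) (hd : d ∈ K) :
    (PySem.Dict.mk (K.map (fun x => (x, V x)))).get? d = some (V d) := by
  induction K with
  | nil => cases hd
  | cons k rest ih =>
      by_cases hk : k = d
      · subst hk
        simp [PySem.Dict.get?_mk_cons]
      · have hd' : d ∈ rest := (List.mem_cons.mp hd).resolve_left (fun h => hk h.symm)
        simp only [List.map_cons, PySem.Dict.get?_mk_cons]
        rw [if_neg (by simp [hk])]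
        exact ih hd'

-- the invariant: the dict A builds from a pair list L has exactly B's items
lemma pvMain (L : List (String × String)) :
    L.foldl pvStep PySem.Dict.empty = PySem.Dict.mk (pvItems L) := by
  induction L using List.reverseRecOn with
  | nil => rfl
  | append_singleton L p ih =>
      obtain ⟨d, v⟩ := p
      rw [List.foldl_append, List.foldl_cons, List.foldl_nil, ih]
      have hdedup : PySem.List.dedup ((L ++ [(d, v)]).map Prod.fst)
          = if d ∈ L.map Prod.fst then PySem.List.dedup (L.map Prod.fst)
            else PySem.List.dedup (L.map Prod.fst) ++ [d] := by
        simp only [List.map_append, List.map_cons, List.map_nil]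
        rw [PySem.List.dedup_eq_ofList, PySem.Set.ofList_eq_foldl, List.foldl_append,
          List.foldl_cons, List.foldl_nil, ← PySem.Set.ofList_eq_foldl,
          ← PySem.List.dedup_eq_ofList]
        by_cases hmem : d ∈ L.map Prod.fst <;>
          simp [PySem.Set.add, PySem.Set.contains, hmem]
      have hVnew : ∀ x, pvV (L ++ [(d, v)]) x = pvV L x ++ (if d = x then [v] else []) := by
        intro x
        unfold pvV
        rw [List.filter_append]
        by_cases h : d = x <;> simp [h]
      by_cases hmem : d ∈ L.map Prod.fst
      · -- key already present: in-place update of its entry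
        have hdK : d ∈ PySem.List.dedup (L.map Prod.fst) := by
          rw [PySem.List.mem_dedup]; exact hmem
        unfold pvStep
        simp only [pvContains L d, hmem, decide_true]
        rw [if_neg (by simp)]
        rw [show (PySem.Dict.mk (pvItems L)).modify d [] (fun l => l ++ [v])
            = (PySem.Dict.mk (pvItems L)).insert d
                (((PySem.Dict.mk (pvItems L)).getD d []) ++ [v]) from rfl]
        have hgd := pvGet_mk_map (PySem.List.dedup (L.map Prod.fst)) (pvV L) d hdK
        rw [show (PySem.Dict.mk (pvItems L)).getD d [] = pvV L d from by
          simp only [PySem.Dict.getD, pvItems, hgd, Option.getD_some]]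
        rw [show ((PySem.Dict.mk (pvItems L)).insert d (pvV L d ++ [v]))
            = PySem.Dict.mk ((pvItems L).map
                (fun p => if p.1 == d then (d, pvV L d ++ [v]) else p)) from by
          simp [PySem.Dict.insert, pvContains L d, hmem]]
        apply congrArg
        unfold pvItems
        rw [hdedup, if_pos hmem, List.map_map]
        apply List.map_congr_left
        intro x _
        by_cases h : x = d
        · subst h; simp [hVnew]
        · simp [h, hVnew, Ne.symm h]
      · -- new key: appended with [] then filled in place
        have hdK : d ∉ PySem.List.dedup (L.map Prod.fst) := by
          rw [PySem.List.mem_dedup]; exact hmem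
        unfold pvStep
        simp only [pvContains L d, hmem, decide_false, reduceIte]
        have hins : (PySem.Dict.mk (pvItems L)).insert d ([] : List String)
            = PySem.Dict.mk ((PySem.List.dedup (L.map Prod.fst) ++ [d]).map
                (fun x => (x, if x = d then [] else pvV L x))) := by
          rw [show (PySem.Dict.mk (pvItems L)).insert d ([] : List String)
              = PySem.Dict.mk (pvItems L ++ [(d, [])]) from by
            simp [PySem.Dict.insert, pvContains L d, hmem]]
          apply congrArg
          unfold pvItems
          simp only [List.map_append, List.map_cons, List.map_nil]
          congr 1
          apply List.map_congr_left
          intro x hx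
          have : x ≠ d := fun h => hdK (h ▸ hx)
          simp [this]
        rw [hins]
        have hget : (PySem.Dict.mk ((PySem.List.dedup (L.map Prod.fst) ++ [d]).map
            (fun x => (x, if x = d then [] else pvV L x)))).getD d [] = [] := by
          have hg := pvGet_mk_map (PySem.List.dedup (L.map Prod.fst) ++ [d])
            (fun x => if x = d then [] else pvV L x) d (by simp)
          simp only [PySem.Dict.getD, hg, Option.getD_some]
          simp
        have hcont2 : (PySem.Dict.mk ((PySem.List.dedup (L.map Prod.fst) ++ [d]).map
            (fun x => (x, if x = d then [] else pvV L x)))).contains d = true := by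
          simp [PySem.Dict.contains]
        rw [show ∀ m : PySem.Dict String (List String),
            m.modify d [] (fun l => l ++ [v]) = m.insert d (m.getD d [] ++ [v]) from
          fun m => rfl]
        rw [hget]
        simp only [PySem.Dict.insert, hcont2, if_true, List.nil_append]
        apply congrArg
        unfold pvItems
        rw [hdedup, if_neg hmem]
        simp only [List.map_map, List.map_append, List.map_cons, List.map_nil]
        congr 1
        · apply List.map_congr_left
          intro x hx
          have hxd : x ≠ d := fun h => hdK (h ▸ hx)
          simp [hxd, Ne.symm hxd, hVnew]
        · have hVd : pvV L d = [] := by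
            unfold pvV
            rw [List.filter_eq_nil_iff.mpr, List.map_nil]
            intro p hp hpd
            exact hmem (by
              have : p.1 = d := by simpa using hpd
              simpa [this] using List.mem_map_of_mem (f := Prod.fst) hp)
          simp [hVnew, hVd]

-- ===== VERDICT (by name: the statement is the Claim_ definition above) =====
theorem preprocess_observables_spec : Claim_equal_preprocess_observables := by
  intro observables _ _
  show preprocess_observables observables = preprocess_observables_alt observables
  unfold preprocess_observables preprocess_observables_alt
  rw [pvA_fold, pvB_pairs, pvMain]
  rfl
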